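-- pv_equiv track=rewrite | github.com/demar01/python | Chapter_PyBites/189_Filter_a_list_of_names/controlflow.py | filter_names2
-- ===== SOURCE A (Python) =====
-- IGNORE_CHAR = 'b'
--
-- QUIT_CHAR = 'q'
--
-- MAX_NAMES = 5
--
-- def filter_names2(names):
--     count = 0
--     for name in names:
--         if count == MAX_NAMES or name.startswith(QUIT_CHAR):
--             break
--         if name.startswith(IGNORE_CHAR) or any(char.isdigit() for char in name):
--             continue
--         count += 1
--         yield name
-- ===== SOURCE B (Python) =====
-- IGNORE_CHAR = 'b'
-- QUIT_CHAR = 'q'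
-- MAX_NAMES = 5
-- DIGITS = set("0123456789")
--
-- def filter_names2(names):
--     # Eager staged passes over a materialized list (A is lazy; return value only).
--     names = list(names)
--     cut = len(names)
--     for i, n in enumerate(names):
--         if n.startswith(QUIT_CHAR):
--             cut = i
--             break
--     kept = [n for n in names[:cut]
--             if not n.startswith(IGNORE_CHAR) and DIGITS.isdisjoint(n)]
--     yield from kept[:MAX_NAMES]
-- ===== Notes on version B (the rewrite author's own statement) =====
-- stated objective: alternative
-- what changed: Replaces A's lazy single-pass counting generator with eager staged passes: first an index scan locating the quit cut point, then a list-comprehension filter of that prefix (digit test via set disjointness with DIGITS), then a [:5] slice; return-value-only equivalence (A yields lazily, B materializes).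
import Mathlib
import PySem

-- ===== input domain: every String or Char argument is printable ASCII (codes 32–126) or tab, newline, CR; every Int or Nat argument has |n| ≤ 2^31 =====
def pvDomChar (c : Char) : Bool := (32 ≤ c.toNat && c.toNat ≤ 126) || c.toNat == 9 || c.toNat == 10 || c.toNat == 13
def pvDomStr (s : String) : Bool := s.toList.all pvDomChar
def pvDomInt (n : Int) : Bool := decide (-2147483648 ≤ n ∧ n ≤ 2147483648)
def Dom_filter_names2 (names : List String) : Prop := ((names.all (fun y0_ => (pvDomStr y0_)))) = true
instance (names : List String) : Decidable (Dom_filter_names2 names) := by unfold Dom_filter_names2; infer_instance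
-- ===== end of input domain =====

-- B replaces A's lazy counting loop with eager staged passes (quit cut index, prefix filter with a digit-set disjointness test, [:5] slice); equivalence is about the returned sequence only (A is a lazy generator, B materializes).


-- ===== PORT A =====
-- the explicit loop: count, break on 5 or 'q'-prefix, skip 'b'-prefix or digit-containing names
def filterNamesLoop : List String → Nat → List String
  | [], _ => []
  | name :: rest, count =>
    if count == 5 || PySem.Str.startswith name "q" then []
    else if PySem.Str.startswith name "b" || name.toList.any PySem.Chars.isdigit then
      filterNamesLoop rest count
    else
      name :: filterNamesLoop rest (count + 1)

def filter_names2 (names : List String) : List String := filterNamesLoop names 0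

-- ===== PORT B =====
-- DIGITS = set("0123456789")
def pvDigits : List Char := "0123456789".toList

-- the cut-finding index scan: first i with names[i].startswith('q'), else len(names)
def pvFindCut : List String → Nat
  | [] => 0
  | n :: rest => if PySem.Str.startswith n "q" then 0 else pvFindCut rest + 1

-- names[:cut] is List.take cut (exact: 0 ≤ cut ≤ len); DIGITS.isdisjoint(n) is "no char of n in pvDigits"
def filter_names2_alt (names : List String) : List String :=
  let cut := pvFindCut names
  let kept := (names.take cut).filter
      (fun n => !(PySem.Str.startswith n "b") && n.toList.all (fun c => !(pvDigits.contains c)))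
  kept.take 5

-- ===== PRECONDITION & SPEC =====
def Spec_filter_names2 (names : List String) (out : List String) : Prop := out = filter_names2_alt names
instance (names : List String) (out : List String) : Decidable (Spec_filter_names2 names out) := by unfold Spec_filter_names2; infer_instance

-- ===== CLAIM =====
def Claim_equal_filter_names2 : Prop := ∀ (names : List String), Dom_filter_names2 names → Spec_filter_names2 names (filter_names2 names)

-- ===== LEMMAS AND PROOFS =====
-- membership in the ten-digit list is exactly the char isdigit test
theorem pvDigits_contains (c : Char) : (decide (c ∈ pvDigits)) = PySem.Chars.isdigit c := by
  rw [Bool.eq_iff_iff]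
  simp [pvDigits, PySem.Chars.isdigit, Char.le_def, Char.ext_iff, UInt32.le_iff_toNat_le, UInt32.ext_iff]
  omega

-- B's cut-index prefix is A's takeWhile prefix
theorem take_pvFindCut (names : List String) :
    names.take (pvFindCut names) = names.takeWhile (fun n => !PySem.Str.startswith n "q") := by
  induction names with
  | nil => rfl
  | cons n rest ih =>
    by_cases h : PySem.Chars.startswith n.toList ['q'] = true
    · simp [pvFindCut, h]
    · simp [pvFindCut, h, ih]

-- A's counting loop produces the filtered takeWhile prefix, capped at 5 - count
theorem filterNamesLoop_eq (names : List String) :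
    ∀ count : Nat, count ≤ 5 →
      filterNamesLoop names count =
        (((names.takeWhile (fun n => !PySem.Str.startswith n "q")).filter
            (fun n => !(PySem.Str.startswith n "b") &&
                      !(n.toList.any PySem.Chars.isdigit))).take (5 - count)) := by
  induction names with
  | nil => intro count _; simp [filterNamesLoop]
  | cons name rest ih =>
    intro count hc
    by_cases hq : PySem.Chars.startswith name.toList ['q'] = true
    · simp [filterNamesLoop, hq]
    · by_cases h5 : count = 5
      · simp [filterNamesLoop, h5]
      · have hc' : count + 1 ≤ 5 := by omega
        by_cases hb : PySem.Chars.startswith name.toList ['b'] = true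
        · simp [filterNamesLoop, hq, h5, hb, ih count hc]
        · by_cases hd : name.toList.any PySem.Chars.isdigit = true
          · simp only [List.any_eq_true] at hd
            simp [filterNamesLoop, hq, h5, hb, hd, ih count hc]
          · simp only [List.any_eq_true, not_exists, not_and, Bool.not_eq_true] at hd
            have hstep : 5 - count = (5 - (count + 1)) + 1 := by omega
            have hL : filterNamesLoop (name :: rest) count
                = name :: filterNamesLoop rest (count + 1) := by
              simp only [filterNamesLoop]
              rw [if_neg (by simp [hq, h5]), if_neg (by simp [hb]; exact hd)]
            rw [hL, ih (count + 1) hc', List.takeWhile_cons,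
                if_pos (by simp [hq]), List.filter_cons,
                if_pos (by simp [hb]; exact hd), hstep, List.take_succ_cons]

-- B's filter predicate is A's (digit-set disjointness = no digit char)
theorem pred_eq (n : String) :
    (!(PySem.Chars.startswith n.toList ['b']) && n.toList.all (fun c => !(decide (c ∈ pvDigits))))
      = (!(PySem.Chars.startswith n.toList ['b']) && !(n.toList.any PySem.Chars.isdigit)) := by
  simp [List.all_eq_not_any_not, pvDigits_contains]

-- ===== VERDICT =====
theorem filter_names2_spec : Claim_equal_filter_names2 := by
  intro names _
  unfold Spec_filter_names2 filter_names2 filter_names2_alt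
  rw [filterNamesLoop_eq names 0 (by omega)]
  simp [take_pvFindCut, pred_eq]
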